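-- pv_equiv track=rewrite | github.com/georgebanjog/sdxl-node-merger | engine/tensor_io.py | get_block_id_for_key
-- ===== SOURCE A (Python) =====
-- def get_block_id_for_key(key: str) -> str:
--     """Determine which MBW block a tensor key belongs to."""
--     if key.startswith("first_stage_model."):
--         return "VAE"
--     if key.startswith("cond_stage_model.") or key.startswith("conditioner.embedders.0."):
--         return "TE1"
--     if key.startswith("conditioner.embedders.1."):
--         return "TE2"
--     if "time_embed" in key:
--         return "TIME_EMBED"
--     if "label_emb" in key:
--         return "LABEL_EMB"
--     if "middle_block" in key:
--         return "MID"
--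
--     for i in range(9):
--         prefix = f"model.diffusion_model.input_blocks.{i}."
--         if key.startswith(prefix):
--             return f"IN{i:02d}"
--
--     for i in range(9):
--         prefix = f"model.diffusion_model.output_blocks.{i}."
--         if key.startswith(prefix):
--             return f"OUT{i:02d}"
--
--     if key.startswith("model.diffusion_model.out."):
--         return "OUT_FINAL"
--
--     # Default to MID for unknown diffusion model keys
--     if key.startswith("model.diffusion_model."):
--         return "MID"
--
--     return "OTHER"
-- ===== SOURCE B (Python) =====
-- def _parse_block(key, prefix, tag):
--     """If key is prefix + single digit 0-8 + '.', return tag + that digit, else None."""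
--     if not key.startswith(prefix):
--         return None
--     rem = key[len(prefix):]
--     if rem[1:2] == "." and rem[0:1] in "012345678":
--         return tag + rem[0:1]
--     return None
--
--
-- def get_block_id_for_key(key: str) -> str:
--     """Determine which MBW block a tensor key belongs to."""
--     if key.startswith("first_stage_model."):
--         return "VAE"
--     if key.startswith("cond_stage_model.") or key.startswith("conditioner.embedders.0."):
--         return "TE1"
--     if key.startswith("conditioner.embedders.1."):
--         return "TE2"
--     if "time_embed" in key:
--         return "TIME_EMBED"
--     if "label_emb" in key:
--         return "LABEL_EMB"
--     if "middle_block" in key: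
--         return "MID"
--
--     hit = _parse_block(key, "model.diffusion_model.input_blocks.", "IN0")
--     if hit is not None:
--         return hit
--     hit = _parse_block(key, "model.diffusion_model.output_blocks.", "OUT0")
--     if hit is not None:
--         return hit
--
--     if key.startswith("model.diffusion_model.out."):
--         return "OUT_FINAL"
--     if key.startswith("model.diffusion_model."):
--         return "MID"
--     return "OTHER"
-- ===== Notes on version B (the rewrite author's own statement) =====
-- stated objective: simpler
-- what changed: The two range(9) prefix-scan loops are replaced by a shared _parse_block helper that checks the block prefix once and inspects the two characters after it (a digit 0-8 followed by '.') directly via slicing.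
import Mathlib
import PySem

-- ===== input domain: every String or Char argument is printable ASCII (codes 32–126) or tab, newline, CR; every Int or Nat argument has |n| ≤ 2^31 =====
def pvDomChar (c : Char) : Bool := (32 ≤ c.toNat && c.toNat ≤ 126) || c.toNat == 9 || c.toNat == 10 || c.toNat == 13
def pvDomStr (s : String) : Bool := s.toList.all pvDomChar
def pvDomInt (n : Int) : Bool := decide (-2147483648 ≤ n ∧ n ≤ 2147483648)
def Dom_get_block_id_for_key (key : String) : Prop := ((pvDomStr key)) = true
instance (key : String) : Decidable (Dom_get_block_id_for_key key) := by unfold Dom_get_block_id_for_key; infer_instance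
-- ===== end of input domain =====

-- B replaces A's two fixed range(9) prefix scans by a single parse of the two characters after
-- the block prefix (simpler decomposition; same behaviour).

-- ===== PORT A =====
-- f"{i:02d}" for a nonnegative int i (as A uses it)
def pvFmt02 (i : Int) : String :=
  if PySem.Str.len (PySem.Int.toStr i) < 2 then "0" ++ PySem.Int.toStr i else PySem.Int.toStr i

-- 'for i in range(9): if key.startswith(f"{base}{i}."): return f"{tag}{i:02d}"'
-- (A's two loops are this recursion with base/tag = input_blocks./IN and output_blocks./OUT)
def pvScanLoop (key base tag : String) : List Int → Option String
  | [] => none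
  | i :: is =>
    if PySem.Str.startswith key (base ++ PySem.Int.toStr i ++ ".") then
      some (tag ++ pvFmt02 i)
    else pvScanLoop key base tag is

def get_block_id_for_key (key : String) : String :=
  if PySem.Str.startswith key "first_stage_model." then "VAE"
  else if PySem.Str.startswith key "cond_stage_model." || PySem.Str.startswith key "conditioner.embedders.0." then "TE1"
  else if PySem.Str.startswith key "conditioner.embedders.1." then "TE2"
  else if PySem.Str.isIn "time_embed" key then "TIME_EMBED"
  else if PySem.Str.isIn "label_emb" key then "LABEL_EMB"
  else if PySem.Str.isIn "middle_block" key then "MID"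
  else match pvScanLoop key "model.diffusion_model.input_blocks." "IN" (PySem.List.pyRange 0 9 1) with
    | some r => r
    | none => match pvScanLoop key "model.diffusion_model.output_blocks." "OUT" (PySem.List.pyRange 0 9 1) with
      | some r => r
      | none =>
        if PySem.Str.startswith key "model.diffusion_model.out." then "OUT_FINAL"
        else if PySem.Str.startswith key "model.diffusion_model." then "MID"
        else "OTHER"

-- ===== PORT B =====
-- _parse_block(key, prefix, tag): tag + the digit if key is prefix + digit 0-8 + '.', else None
def pvParseBlock (key pre tag : String) : Option String :=
  if !(PySem.Str.startswith key pre) then none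
  else
    let rem := PySem.Str.slice key (some (PySem.Str.len pre)) none
    if PySem.Str.slice rem (some 1) (some 2) == "." &&
       PySem.Str.isIn (PySem.Str.slice rem (some 0) (some 1)) "012345678" then
      some (tag ++ PySem.Str.slice rem (some 0) (some 1))
    else none

def get_block_id_for_key_alt (key : String) : String :=
  if PySem.Str.startswith key "first_stage_model." then "VAE"
  else if PySem.Str.startswith key "cond_stage_model." || PySem.Str.startswith key "conditioner.embedders.0." then "TE1"
  else if PySem.Str.startswith key "conditioner.embedders.1." then "TE2"
  else if PySem.Str.isIn "time_embed" key then "TIME_EMBED"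
  else if PySem.Str.isIn "label_emb" key then "LABEL_EMB"
  else if PySem.Str.isIn "middle_block" key then "MID"
  else match pvParseBlock key "model.diffusion_model.input_blocks." "IN0" with
    | some r => r
    | none => match pvParseBlock key "model.diffusion_model.output_blocks." "OUT0" with
      | some r => r
      | none =>
        if PySem.Str.startswith key "model.diffusion_model.out." then "OUT_FINAL"
        else if PySem.Str.startswith key "model.diffusion_model." then "MID"
        else "OTHER"

-- ===== PRECONDITION & SPEC =====
def Spec_get_block_id_for_key (key : String) (out : String) : Prop := out = get_block_id_for_key_alt key
instance (key : String) (out : String) : Decidable (Spec_get_block_id_for_key key out) := by unfold Spec_get_block_id_for_key; infer_instance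

-- ===== CLAIM (what is proved, stated in full; the proofs are below) =====
def Claim_equal_get_block_id_for_key : Prop := ∀ (key : String), Dom_get_block_id_for_key key → Spec_get_block_id_for_key key (get_block_id_for_key key)

-- ===== LEMMAS AND PROOFS =====

lemma pv_sw_app (p s q : List Char) :
    PySem.Chars.startswith (p ++ s) (p ++ q) = PySem.Chars.startswith s q := by
  rw [Bool.eq_iff_iff]
  simp [PySem.Chars.startswith_iff, List.prefix_append_right_inj]

lemma pv_sw_two (c c2 d : Char) (t : List Char) :
    PySem.Chars.startswith (c :: c2 :: t) [d, '.'] = (c == d && c2 == '.') := by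
  rw [Bool.eq_iff_iff]
  simp only [PySem.Chars.startswith_iff, List.cons_prefix_cons, List.nil_prefix, and_true,
    Bool.and_eq_true, beq_iff_eq]
  exact ⟨fun ⟨h1, h2⟩ => ⟨h1.symm, h2.symm⟩, fun ⟨h1, h2⟩ => ⟨h1.symm, h2.symm⟩⟩

lemma pv_isIn_singleton (c : Char) (s : List Char) :
    PySem.Chars.isIn [c] s = s.contains c := by
  rw [Bool.eq_iff_iff]
  simp [PySem.Chars.isIn_iff_infix, List.singleton_infix_iff]

-- A's range(9) prefix scan computes exactly B's digit-and-dot parse of the suffix after `base`.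
set_option maxHeartbeats 1000000 in
lemma pv_scan_eq_parse (key base tag : String) :
    pvScanLoop key base tag (PySem.List.pyRange 0 9 1) = pvParseBlock key base (tag ++ "0") := by
  rw [show PySem.List.pyRange 0 9 1 = [0,1,2,3,4,5,6,7,8] from by decide]
  by_cases hp : base.toList <+: key.toList
  · obtain ⟨rest, hrest⟩ := hp
    have hkey : key = String.ofList (base.toList ++ rest) := by
      rw [hrest, String.ofList_toList]
    subst hkey
    have hsw : ∀ q : String, PySem.Str.startswith (String.ofList (base.toList ++ rest)) (base ++ q)
        = PySem.Chars.startswith rest q.toList := by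
      intro q
      rw [PySem.Str.startswith_eq, String.toList_ofList, String.toList_append, pv_sw_app]
    have hswb : PySem.Str.startswith (String.ofList (base.toList ++ rest)) base = true := by
      have h := hsw ""
      rw [show base ++ "" = base from by simp] at h
      rw [h]
      simp [PySem.Chars.startswith]
    have hrem : PySem.Str.slice (String.ofList (base.toList ++ rest)) (some (PySem.Str.len base)) none
        = String.ofList rest := by
      apply String.ext_iff.mpr
      simp [pysem]
    simp only [pvScanLoop, pvParseBlock, String.append_assoc, hsw, hrem, hswb,
      Bool.not_true, Bool.false_eq_true, if_false]
    simp only [show (PySem.Int.toStr 0 ++ "." : String).toList = ['0','.'] from by decide,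
      show (PySem.Int.toStr 1 ++ "." : String).toList = ['1','.'] from by decide,
      show (PySem.Int.toStr 2 ++ "." : String).toList = ['2','.'] from by decide,
      show (PySem.Int.toStr 3 ++ "." : String).toList = ['3','.'] from by decide,
      show (PySem.Int.toStr 4 ++ "." : String).toList = ['4','.'] from by decide,
      show (PySem.Int.toStr 5 ++ "." : String).toList = ['5','.'] from by decide,
      show (PySem.Int.toStr 6 ++ "." : String).toList = ['6','.'] from by decide,
      show (PySem.Int.toStr 7 ++ "." : String).toList = ['7','.'] from by decide,
      show (PySem.Int.toStr 8 ++ "." : String).toList = ['8','.'] from by decide]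
    rcases rest with _ | ⟨c, _ | ⟨c2, t⟩⟩
    · simp [PySem.Chars.startswith,
        show (PySem.Str.slice (String.ofList ([] : List Char)) (some 1) (some 2) == ".") = false from by decide]
    · have hc : (PySem.Str.slice (String.ofList [c]) (some 1) (some 2) == ".") = false := by
        refine beq_eq_false_iff_ne.mpr fun h => ?_
        have := congrArg String.toList h
        simp [pysem] at this
      simp [PySem.Chars.startswith, hc]
    · have hdot : (PySem.Str.slice (String.ofList (c :: c2 :: t)) (some 1) (some 2) == ".") = (c2 == '.') := by
        rw [Bool.eq_iff_iff]
        simp [beq_iff_eq, String.ext_iff, pysem]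
      have hsl : PySem.Str.slice (String.ofList (c :: c2 :: t)) (some 0) (some 1) = String.ofList [c] := by
        apply String.ext_iff.mpr; simp [pysem]
      simp only [pv_sw_two, hdot, hsl]
      by_cases hc2 : c2 = '.'
      · subst hc2
        by_cases hmem : c ∈ (['0','1','2','3','4','5','6','7','8'] : List Char)
        · simp only [List.mem_cons, List.not_mem_nil, or_false] at hmem
          rcases hmem with rfl|rfl|rfl|rfl|rfl|rfl|rfl|rfl|rfl <;>
            simp [pv_isIn_singleton,
              show pvFmt02 0 = "00" from by decide, show ("0" : String) ++ String.ofList ['0'] = "00" from by decide,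
              show pvFmt02 1 = "01" from by decide, show ("0" : String) ++ String.ofList ['1'] = "01" from by decide,
              show pvFmt02 2 = "02" from by decide, show ("0" : String) ++ String.ofList ['2'] = "02" from by decide,
              show pvFmt02 3 = "03" from by decide, show ("0" : String) ++ String.ofList ['3'] = "03" from by decide,
              show pvFmt02 4 = "04" from by decide, show ("0" : String) ++ String.ofList ['4'] = "04" from by decide,
              show pvFmt02 5 = "05" from by decide, show ("0" : String) ++ String.ofList ['5'] = "05" from by decide,
              show pvFmt02 6 = "06" from by decide, show ("0" : String) ++ String.ofList ['6'] = "06" from by decide,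
              show pvFmt02 7 = "07" from by decide, show ("0" : String) ++ String.ofList ['7'] = "07" from by decide,
              show pvFmt02 8 = "08" from by decide, show ("0" : String) ++ String.ofList ['8'] = "08" from by decide]
        · simp only [List.mem_cons, List.not_mem_nil, or_false, not_or] at hmem
          obtain ⟨h0, h1, h2, h3, h4, h5, h6, h7, h8⟩ := hmem
          simp [pv_isIn_singleton, h0, h1, h2, h3, h4, h5, h6, h7, h8]
      · simp [hc2]
  · have hf : ∀ q : String, PySem.Str.startswith key (base ++ q) = false := by
      intro q
      rw [PySem.Str.startswith_eq]
      refine Bool.eq_false_iff.mpr fun h => hp ?_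
      have h2 := (PySem.Chars.startswith_iff _ _).mp h
      rw [String.toList_append] at h2
      exact (List.prefix_append _ _).trans h2
    have hfb : PySem.Str.startswith key base = false := by
      have := hf ""
      simpa using this
    simp only [pvScanLoop, pvParseBlock, String.append_assoc, hf, hfb]
    simp

-- ===== VERDICT (by name: the statement is the Claim_ definition above) =====
theorem get_block_id_for_key_spec : Claim_equal_get_block_id_for_key := by
  intro key _
  unfold Spec_get_block_id_for_key get_block_id_for_key get_block_id_for_key_alt
  rw [pv_scan_eq_parse key "model.diffusion_model.input_blocks." "IN",
    pv_scan_eq_parse key "model.diffusion_model.output_blocks." "OUT",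
    show ("IN" ++ "0" : String) = "IN0" from by decide,
    show ("OUT" ++ "0" : String) = "OUT0" from by decide]
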